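-- pv_equiv track=rewrite | github.com/Marco-Masera/compint_quarto | quarto_agent_lib/quarto_utils.py | bits_in_common_multiple
-- ===== SOURCE A (Python) =====
-- def bits_in_common_multiple(list_, list2 = None, last = None, acc = 15):
--     for elem in list_:
--         if (last != None):
--             acc = acc & (~(last ^ elem))
--         last = elem
--     if (list2!=None):
--         last = None
--         for elem in list2:
--             if (last != None):
--                 acc = acc & (~(last ^ elem))
--             last = elem
--     return acc
-- ===== SOURCE B (Python) =====
-- def bits_in_common_multiple(list_, list2 = None, last = None, acc = 15):
--     # B: instead of XOR-ing adjacent pairs, aggregate the bitwise OR and AND of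
--     # each whole sequence; the bits on which a sequence disagrees are o & ~a,
--     # and acc keeps exactly the bits on which every sequence agrees.
--     def disagreement(seq, prev):
--         agg = None if prev is None else (prev, prev)
--         for x in seq:
--             if agg is None:
--                 agg = (x, x)
--             else:
--                 o, a = agg
--                 agg = (o | x, a & x)
--         if agg is None:
--             return 0
--         o, a = agg
--         return o & ~a
--     total = disagreement(list_, last)
--     if list2 is not None:
--         total |= disagreement(list2, None)
--     return acc & ~total
-- ===== Notes on version B (the rewrite author's own statement) =====
-- stated objective: alternative
-- what changed: B replaces A's adjacent-pair XOR masking with per-sequence OR/AND aggregates: for each sequence it computes the bitwise OR and AND of all its elements and the disagreement bits o & ~a, then clears those bits from acc once at the end.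
import Mathlib
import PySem

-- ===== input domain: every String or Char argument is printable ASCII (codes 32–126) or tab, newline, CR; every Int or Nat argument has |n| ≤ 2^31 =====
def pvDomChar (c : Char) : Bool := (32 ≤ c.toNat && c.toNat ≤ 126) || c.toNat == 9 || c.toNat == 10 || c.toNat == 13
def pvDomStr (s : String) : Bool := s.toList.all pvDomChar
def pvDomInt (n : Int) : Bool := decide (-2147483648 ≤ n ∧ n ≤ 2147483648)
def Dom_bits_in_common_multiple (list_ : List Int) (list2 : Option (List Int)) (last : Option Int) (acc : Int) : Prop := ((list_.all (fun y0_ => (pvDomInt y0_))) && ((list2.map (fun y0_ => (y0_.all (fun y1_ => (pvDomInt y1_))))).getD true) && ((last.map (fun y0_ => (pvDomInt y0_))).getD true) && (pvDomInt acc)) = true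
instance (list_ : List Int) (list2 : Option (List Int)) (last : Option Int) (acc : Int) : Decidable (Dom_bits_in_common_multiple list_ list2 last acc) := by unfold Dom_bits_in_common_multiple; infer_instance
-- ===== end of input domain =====

-- B replaces A's adjacent-pair XOR masking with per-sequence OR/AND aggregates
-- (disagreement bits of a sequence are OR & ~AND), cleared from acc once at the end.


-- ===== PORT A =====
-- one loop iteration of A: if last is set, mask acc with the complement of (last ^ elem)
def bicmAStep (s : Option Int × Int) (elem : Int) : Option Int × Int :=
  match s with
  | (some l, a) => (some elem, Int.land a (Int.not (PySem.Int.bxor l elem)))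
  | (none, a) => (some elem, a)

def bits_in_common_multiple (list_ : List Int) (list2 : Option (List Int)) (last : Option Int) (acc : Int) : Int :=
  let s := list_.foldl bicmAStep (last, acc)
  match list2 with
  | none => s.2
  | some l2 => (l2.foldl bicmAStep ((none : Option Int), s.2)).2

-- ===== PORT B =====
-- B's loop body: thread the (OR, AND) aggregate of the elements seen so far
def bicmAgg (s : Option (Int × Int)) (x : Int) : Option (Int × Int) :=
  match s with
  | none => some (x, x)
  | some (o, a) => some (Int.lor o x, Int.land a x)

-- B's helper disagreement: the bits on which the sequence (with optional prev) disagrees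
def bicmDisagreement (seq : List Int) (prev : Option Int) : Int :=
  match seq.foldl bicmAgg (prev.map fun p => (p, p)) with
  | none => 0
  | some (o, a) => Int.land o (Int.not a)

def bits_in_common_multiple_alt (list_ : List Int) (list2 : Option (List Int)) (last : Option Int) (acc : Int) : Int :=
  let total := bicmDisagreement list_ last
  let total := match list2 with
    | some l2 => Int.lor total (bicmDisagreement l2 none)
    | none => total
  Int.land acc (Int.not total)

-- ===== PRECONDITION & SPEC =====
def Spec_bits_in_common_multiple (list_ : List Int) (list2 : Option (List Int)) (last : Option Int) (acc : Int) (out : Int) : Prop := out = bits_in_common_multiple_alt list_ list2 last acc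
instance (list_ : List Int) (list2 : Option (List Int)) (last : Option Int) (acc : Int) (out : Int) : Decidable (Spec_bits_in_common_multiple list_ list2 last acc out) := by unfold Spec_bits_in_common_multiple; infer_instance

-- ===== CLAIM (what is proved, stated in full; the proofs are below) =====
def Claim_equal_bits_in_common_multiple : Prop := ∀ (list_ : List Int) (list2 : Option (List Int)) (last : Option Int) (acc : Int), Dom_bits_in_common_multiple list_ list2 last acc → Spec_bits_in_common_multiple list_ list2 last acc (bits_in_common_multiple list_ list2 last acc)

-- ===== LEMMAS AND PROOFS =====

-- proof-only intermediate: OR of XORs of consecutive elements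
def bicmBStep (s : Option Int × Int) (x : Int) : Option Int × Int :=
  match s with
  | (some p, t) => (some x, Int.lor t (PySem.Int.bxor p x))
  | (none, t) => (some x, t)

def bicmXorOr (seq : List Int) (prev : Option Int) : Int :=
  (seq.foldl bicmBStep (prev, 0)).2

-- proof-only: the aggregate fold on a pair that is always present
def bicmAggP (oa : Int × Int) (x : Int) : Int × Int :=
  (Int.lor oa.1 x, Int.land oa.2 x)

-- De Morgan: a & ~(x | y) = (a & ~x) & ~y  on Int
theorem bicm_land_not_lor (a x y : Int) :
    Int.land a (Int.not (Int.lor x y)) = Int.land (Int.land a (Int.not x)) (Int.not y) := by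
  cases a <;> cases x <;> cases y <;>
    simp only [Int.land, Int.lor, Int.not] <;>
    · apply congrArg
      apply Nat.eq_of_testBit_eq; intro i
      simp [Nat.testBit_ldiff, Nat.testBit_land, Nat.testBit_lor, Bool.and_assoc, Bool.or_assoc,
            Bool.and_left_comm, Bool.or_left_comm, Bool.and_comm, Bool.or_comm]

theorem bicm_lor_assoc (x y z : Int) :
    Int.lor (Int.lor x y) z = Int.lor x (Int.lor y z) := by
  cases x <;> cases y <;> cases z <;>
    simp only [Int.lor] <;>
    · apply congrArg
      apply Nat.eq_of_testBit_eq; intro i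
      simp [Nat.testBit_ldiff, Nat.testBit_land, Nat.testBit_lor, Bool.and_assoc, Bool.or_assoc,
            Bool.and_left_comm, Bool.or_left_comm, Bool.and_comm, Bool.or_comm]

theorem bicm_ldiff_zero (n : Nat) : n.ldiff 0 = n := by
  apply Nat.eq_of_testBit_eq; intro i; simp [Nat.testBit_ldiff]

theorem bicm_lor_zero_left (x : Int) : Int.lor 0 x = x := by
  cases x <;> simp [Int.lor, bicm_ldiff_zero]

theorem bicm_lor_zero_right (x : Int) : Int.lor x 0 = x := by
  cases x <;> simp [Int.lor, bicm_ldiff_zero]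

theorem bicm_land_not_zero (a : Int) : Int.land a (Int.not 0) = a := by
  cases a <;>
  · show Int.land _ (Int.negSucc 0) = _
    simp [Int.land, bicm_ldiff_zero]

theorem bicm_lor_self (x : Int) : Int.lor x x = x := by
  cases x <;>
    simp only [Int.lor] <;>
    · apply congrArg
      apply Nat.eq_of_testBit_eq; intro i
      simp [Nat.testBit_lor, Nat.testBit_land]

theorem bicm_land_self (x : Int) : Int.land x x = x := by
  cases x <;>
    simp only [Int.land] <;>
    · apply congrArg
      apply Nat.eq_of_testBit_eq; intro i
      simp [Nat.testBit_land, Nat.testBit_ldiff]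

theorem bicm_land_not_self (x : Int) : Int.land x (Int.not x) = 0 := by
  cases x <;>
    simp only [Int.land, Int.not] <;>
    · apply congrArg
      apply Nat.eq_of_testBit_eq; intro i
      simp [Nat.testBit_land, Nat.testBit_ldiff]

-- PySem's Python-exact xor agrees with Mathlib's constructor-case xor
theorem bicm_bxor_eq (a b : Int) : PySem.Int.bxor a b = Int.xor a b := by
  cases a <;> cases b <;> simp [PySem.Int.bxor, Int.xor] <;> omega

-- the bitwise tautology driving the OR/AND-aggregate invariant
theorem bicm_ident (o a p x : Int) :
    Int.lor (Int.land (Int.lor o p) (Int.not (Int.land a p))) (Int.xor p x)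
      = Int.land (Int.lor (Int.lor o p) x) (Int.not (Int.land (Int.land a p) x)) := by
  cases o <;> cases a <;> cases p <;> cases x <;>
    simp only [Int.lor, Int.land, Int.not, Int.xor] <;>
    · apply congrArg
      apply Nat.eq_of_testBit_eq; intro i
      simp only [Nat.testBit_ldiff, Nat.testBit_land, Nat.testBit_lor, Nat.testBit_xor]
      generalize Nat.testBit _ i = b1
      generalize Nat.testBit _ i = b2
      generalize Nat.testBit _ i = b3
      generalize Nat.testBit _ i = b4
      revert b1 b2 b3 b4
      decide

-- shifting the initial accumulator of the xor-or fold out as an OR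
theorem bicm_fold_shift (l : List Int) (p : Option Int) (t : Int) :
    (l.foldl bicmBStep (p, t)).2 = Int.lor t (l.foldl bicmBStep (p, 0)).2 := by
  induction l generalizing p t with
  | nil =>
    cases p <;> simp [bicm_lor_zero_right]
  | cons x xs ih =>
    cases p with
    | none =>
      simp only [List.foldl_cons, bicmBStep]
      exact ih (some x) t
    | some pl =>
      simp only [List.foldl_cons, bicmBStep]
      rw [ih (some x) (Int.lor t (PySem.Int.bxor pl x)), ih (some x) (Int.lor 0 (PySem.Int.bxor pl x)),
          bicm_lor_zero_left, bicm_lor_assoc]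

-- the invariant tying A's fold to the xor-or fold
theorem bicm_fold_eq (l : List Int) (p : Option Int) (a t : Int) :
    l.foldl bicmAStep (p, Int.land a (Int.not t)) =
      ((l.foldl bicmBStep (p, t)).1, Int.land a (Int.not (l.foldl bicmBStep (p, t)).2)) := by
  induction l generalizing p t with
  | nil => cases p <;> simp
  | cons x xs ih =>
    cases p with
    | none => simp only [List.foldl_cons, bicmAStep, bicmBStep]; exact ih (some x) t
    | some pl =>
      simp only [List.foldl_cons, bicmAStep, bicmBStep]
      rw [← bicm_land_not_lor]
      exact ih (some x) (Int.lor t (PySem.Int.bxor pl x))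

-- the aggregate fold never leaves `some`
theorem bicm_agg_some (l : List Int) (s : Int × Int) :
    l.foldl bicmAgg (some s) = some (l.foldl bicmAggP s) := by
  induction l generalizing s with
  | nil => rfl
  | cons x xs ih =>
    obtain ⟨o, a⟩ := s
    simpa only [List.foldl_cons, bicmAgg, bicmAggP] using ih (Int.lor o x, Int.land a x)

-- the OR/AND-aggregate invariant against the xor-or fold
theorem bicm_xor_agg (l : List Int) (p o a : Int) :
    Int.lor (Int.land (Int.lor o p) (Int.not (Int.land a p))) ((l.foldl bicmBStep (some p, 0)).2)
      = Int.land (l.foldl bicmAggP (Int.lor o p, Int.land a p)).1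
          (Int.not (l.foldl bicmAggP (Int.lor o p, Int.land a p)).2) := by
  induction l generalizing p o a with
  | nil => simp [bicm_lor_zero_right]
  | cons x xs ih =>
    simp only [List.foldl_cons, bicmBStep, bicmAggP]
    rw [bicm_fold_shift xs (some x), bicm_lor_zero_left, ← bicm_lor_assoc,
        bicm_bxor_eq, bicm_ident]
    exact ih x (Int.lor o p) (Int.land a p)

-- xor-or of consecutive pairs equals B's OR/AND disagreement, for any prev
theorem bicm_xorOr_eq_disagreement (seq : List Int) (prev : Option Int) :
    bicmXorOr seq prev = bicmDisagreement seq prev := by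
  cases prev with
  | some p =>
    unfold bicmXorOr bicmDisagreement
    simp only [Option.map_some, bicm_agg_some]
    have h := bicm_xor_agg seq p p p
    rw [bicm_lor_self, bicm_land_self, bicm_land_not_self, bicm_lor_zero_left] at h
    rw [h]
  | none =>
    cases seq with
    | nil => rfl
    | cons x xs =>
      unfold bicmXorOr bicmDisagreement
      simp only [List.foldl_cons, bicmBStep, bicmAgg, Option.map_none, bicm_agg_some]
      have h := bicm_xor_agg xs x x x
      rw [bicm_lor_self, bicm_land_self, bicm_land_not_self, bicm_lor_zero_left] at h
      rw [h]

-- ===== VERDICT (by name: the statement is the Claim_ definition above) =====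
theorem bits_in_common_multiple_spec : Claim_equal_bits_in_common_multiple := by
  intro list_ list2 last acc _
  show bits_in_common_multiple list_ list2 last acc = bits_in_common_multiple_alt list_ list2 last acc
  have h0 : (last, acc) = (last, Int.land acc (Int.not 0)) := by rw [bicm_land_not_zero]
  cases list2 with
  | none =>
    show (list_.foldl bicmAStep (last, acc)).2
        = Int.land acc (Int.not (bicmDisagreement list_ last))
    rw [← bicm_xorOr_eq_disagreement, h0, bicm_fold_eq]
    rfl
  | some l2 =>
    show (l2.foldl bicmAStep (none, (list_.foldl bicmAStep (last, acc)).2)).2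
        = Int.land acc (Int.not (Int.lor (bicmDisagreement list_ last) (bicmDisagreement l2 none)))
    rw [← bicm_xorOr_eq_disagreement list_ last, ← bicm_xorOr_eq_disagreement l2 none,
        h0, bicm_fold_eq]
    show (l2.foldl bicmAStep (none, Int.land acc (Int.not (bicmXorOr list_ last)))).2
        = Int.land acc (Int.not (Int.lor (bicmXorOr list_ last) (bicmXorOr l2 none)))
    have h1 : (none, Int.land acc (Int.not (bicmXorOr list_ last)))
        = ((none : Option Int), Int.land (Int.land acc (Int.not (bicmXorOr list_ last))) (Int.not 0)) := by
      rw [bicm_land_not_zero]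
    rw [h1, bicm_fold_eq, ← bicm_land_not_lor]
    rfl
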